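-- pv_equiv track=rewrite | github.com/queelius/computational-explorations | src/schur_sidon_bridge.py | _adding_keeps_sum_free
-- ===== SOURCE A (Python) =====
-- from typing import Dict, List, Optional, Set, Tuple
--
-- def _adding_keeps_sum_free(A: Set[int], x: int, N: int) -> bool:
--     """Check whether A | {x} is still sum-free in Z/NZ.
--
--     The new triples that can appear are exactly those involving x:
--       (1) a + b = x  for a, b in A          (x is the sum)
--       (2) a + x = c  for a in A, c in A     (x is a summand)
--       (3) x + x = c  for c in A | {x}       (x added to itself)
--     """
--     x_mod = x % N
--     # Check (3): x + x
--     if (x_mod + x_mod) % N in A or (x_mod + x_mod) % N == x_mod: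
--         # (x+x) % N == x_mod means 2x = x mod N, i.e. x = 0 mod N
--         if (x_mod + x_mod) % N == x_mod:
--             # Only a problem if x_mod is in A (triple x,x,x) — but x isn't in A yet
--             # and triple needs a+b=c with a,b,c all in the set; x+x=x means x=0
--             if x_mod == 0:
--                 pass  # 0+0=0: would be a triple if 0 in A|{x}, which it is
--                 return False
--         elif (x_mod + x_mod) % N in A:
--             return False
--
--     for a in A:
--         # Check (2): a + x = c, c in A (c != x since x not yet in A)
--         if (a + x_mod) % N in A:
--             return False
--         # Check (1): a + b = x, b in A
--         b_needed = (x_mod - a) % N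
--         if b_needed in A:
--             return False
--
--     return True
-- ===== SOURCE B (Python) =====
-- def _pair_sum(S, C, t):
--     """S and C ascending; is there s in S and c in C with s + c == t?"""
--     i, j = 0, len(C) - 1
--     while i < len(S) and j >= 0:
--         v = S[i] + C[j]
--         if v == t:
--             return True
--         if v > t:
--             j -= 1
--         else:
--             i += 1
--     return False
--
--
-- def _adding_keeps_sum_free(A, x, N):
--     r = x % N
--     if r == 0:
--         return False  # 0+0=0 would be a triple in A | {x}
--     R = sorted(a % N for a in A)            # residues of A, ascending
--     C = sorted(a for a in A if a % N == a)  # elements of A already in canonical form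
--     if (r + r) % N in C:                    # x + x = c
--         return False
--     negR = [-s for s in reversed(R)]        # ascending again
--     # a + b = x (mod N)  <=>  s + c == r or r + N      (s residue, c canonical member)
--     # a + x = c (mod N)  <=>  c + (-s) == r or r - N
--     return not any(_pair_sum(R, C, t) for t in (r, r + N)) and \
--            not any(_pair_sum(C, negR, t) for t in (r, r - N))
-- ===== Notes on version B (the rewrite author's own statement) =====
-- stated objective: alternative
-- what changed: Replaces A's per-element membership scan against the set with an order-based algorithm: reduce A to sorted residue/canonical lists, resolve each modular condition into two exact integer targets, and decide each target with a classic two-pointer sweep over the two sorted lists (no hash membership in the main passes).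
import Mathlib
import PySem

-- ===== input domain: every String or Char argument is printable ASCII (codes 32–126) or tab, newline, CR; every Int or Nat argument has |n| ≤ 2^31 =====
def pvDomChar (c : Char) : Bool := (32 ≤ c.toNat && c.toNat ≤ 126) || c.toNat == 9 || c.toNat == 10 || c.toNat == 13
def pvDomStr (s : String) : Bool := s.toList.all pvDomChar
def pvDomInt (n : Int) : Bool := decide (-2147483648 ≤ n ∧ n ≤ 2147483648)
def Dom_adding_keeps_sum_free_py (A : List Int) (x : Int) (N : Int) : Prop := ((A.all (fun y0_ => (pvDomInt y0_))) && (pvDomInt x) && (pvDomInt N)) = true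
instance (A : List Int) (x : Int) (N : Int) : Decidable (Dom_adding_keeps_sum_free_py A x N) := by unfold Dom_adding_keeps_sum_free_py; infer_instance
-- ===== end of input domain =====

-- B replaces A's hash-membership scan by a sort-based algorithm: sorted residue and
-- canonical-member lists, each modular condition resolved to two exact integer targets,
-- each target decided by a two-pointer sweep over the sorted lists (objective: alternative).

-- ===== PORT A =====
-- the 'for a in A' loop with its two early returns
def pvLoopA (S : List Int) (A : List Int) (x_mod N : Int) : Bool :=
  match S with
  | [] => true
  | a :: rest =>
    if A.contains (PySem.Int.mod (a + x_mod) N) then false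
    else if A.contains (PySem.Int.mod (x_mod - a) N) then false
    else pvLoopA rest A x_mod N

def adding_keeps_sum_free_py (A : List Int) (x : Int) (N : Int) : Bool :=
  let x_mod := PySem.Int.mod x N
  if A.contains (PySem.Int.mod (x_mod + x_mod) N) || (PySem.Int.mod (x_mod + x_mod) N == x_mod) then
    if PySem.Int.mod (x_mod + x_mod) N == x_mod then
      if x_mod == 0 then false
      else pvLoopA A A x_mod N
    else if A.contains (PySem.Int.mod (x_mod + x_mod) N) then false
    else pvLoopA A A x_mod N
  else pvLoopA A A x_mod N

-- ===== PORT B =====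
-- Source B's _pair_sum: two pointers, i climbing S from the left, j descending C from the right
def pvPairSum (S C : List Int) (t : Int) (i j : Nat) : Bool :=
  match hS : S[i]?, hC : C[j]? with
  | some s, some c =>
    if s + c == t then true
    else if s + c > t then
      if j = 0 then false else pvPairSum S C t i (j - 1)
    else pvPairSum S C t (i + 1) j
  | _, _ => false
termination_by (S.length - i) + j
decreasing_by
  · omega
  · have : i < S.length := (List.getElem?_eq_some_iff.mp hS).1
    omega

def adding_keeps_sum_free_py_alt (A : List Int) (x : Int) (N : Int) : Bool :=
  let r := PySem.Int.mod x N
  if r == 0 then false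
  else
    let R := PySem.List.sorted (A.map (fun a => PySem.Int.mod a N)) (fun v => v)
    let C := PySem.List.sorted (A.filter (fun a => PySem.Int.mod a N == a)) (fun v => v)
    if C.contains (PySem.Int.mod (r + r) N) then false
    else
      let negR := R.reverse.map (fun s => -s)
      (!([r, r + N].any (fun t => pvPairSum R C t 0 (C.length - 1)))) &&
      (!([r, r - N].any (fun t => pvPairSum C negR t 0 (negR.length - 1))))

-- ===== PRECONDITION & SPEC =====
-- Pre_ excludes only N = 0, where the Python A raises ZeroDivisionError on 'x % N'.
def Pre_adding_keeps_sum_free_py (A : List Int) (x : Int) (N : Int) : Prop := N ≠ 0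
instance (A : List Int) (x : Int) (N : Int) : Decidable (Pre_adding_keeps_sum_free_py A x N) := by unfold Pre_adding_keeps_sum_free_py; infer_instance
def pvWitness_adding_keeps_sum_free_py : List Int × Int × Int := ([1], 1, 5)

def Spec_adding_keeps_sum_free_py (A : List Int) (x : Int) (N : Int) (out : Bool) : Prop := out = adding_keeps_sum_free_py_alt A x N
instance (A : List Int) (x : Int) (N : Int) (out : Bool) : Decidable (Spec_adding_keeps_sum_free_py A x N out) := by unfold Spec_adding_keeps_sum_free_py; infer_instance

-- ===== CLAIM (what is proved, stated in full; the proofs are below) =====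
def Claim_equal_adding_keeps_sum_free_py : Prop := ∀ (A : List Int) (x : Int) (N : Int), Dom_adding_keeps_sum_free_py A x N → Pre_adding_keeps_sum_free_py A x N → Spec_adding_keeps_sum_free_py A x N (adding_keeps_sum_free_py A x N)

-- ===== LEMMAS AND PROOFS =====

-- |x fmod N| < |N| for N ≠ 0
theorem pv_mod_abs_lt (x N : Int) (hN : N ≠ 0) : |PySem.Int.mod x N| < |N| := by
  rcases lt_or_gt_of_ne hN with h | h
  · have := PySem.Int.mod_neg_bounds x h
    rw [abs_of_nonpos this.2, abs_of_neg h]; omega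
  · have h1 := PySem.Int.mod_nonneg x h
    have h2 := PySem.Int.mod_lt x h
    rw [abs_of_nonneg h1, abs_of_pos h]; omega

-- congruent ints have the same Python mod
theorem pv_mod_congr (u v N : Int) (hN : N ≠ 0) (h : N ∣ (u - v)) :
    PySem.Int.mod u N = PySem.Int.mod v N := by
  have hu := PySem.Int.floordiv_mul_add_mod u N
  have hv := PySem.Int.floordiv_mul_add_mod v N
  obtain ⟨k, hk⟩ := h
  have hdvd : N ∣ (PySem.Int.mod u N - PySem.Int.mod v N) :=
    ⟨k - PySem.Int.floordiv u N + PySem.Int.floordiv v N, by linear_combination hu - hv + hk⟩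
  have habs : |PySem.Int.mod u N - PySem.Int.mod v N| < |N| := by
    rcases lt_or_gt_of_ne hN with h' | h'
    · have c1 := PySem.Int.mod_neg_bounds u h'
      have c2 := PySem.Int.mod_neg_bounds v h'
      rw [abs_of_neg h', abs_lt]; omega
    · have c1 := PySem.Int.mod_nonneg u h'
      have c2 := PySem.Int.mod_lt u h'
      have c3 := PySem.Int.mod_nonneg v h'
      have c4 := PySem.Int.mod_lt v h'
      rw [abs_of_pos h', abs_lt]; omega
  have := Int.eq_zero_of_abs_lt_dvd ((abs_dvd N _).mpr hdvd) habs
  omega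

-- fmod is idempotent
theorem pv_mod_idem (y N : Int) (hN : N ≠ 0) :
    PySem.Int.mod (PySem.Int.mod y N) N = PySem.Int.mod y N := by
  have h := PySem.Int.floordiv_mul_add_mod y N
  exact pv_mod_congr (PySem.Int.mod y N) y N hN ⟨-(PySem.Int.floordiv y N), by linear_combination h⟩

-- (2m) fmod N = m ↔ m = 0, for m = x fmod N
theorem pv_double_mod_eq_self_iff (x N : Int) (hN : N ≠ 0) :
    PySem.Int.mod (PySem.Int.mod x N + PySem.Int.mod x N) N = PySem.Int.mod x N ↔
      PySem.Int.mod x N = 0 := by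
  set m := PySem.Int.mod x N with hm
  constructor
  · intro h
    have hq := PySem.Int.floordiv_mul_add_mod (m + m) N
    rw [h] at hq
    have hdvd : N ∣ m := ⟨PySem.Int.floordiv (m + m) N, by linarith⟩
    exact Int.eq_zero_of_abs_lt_dvd ((abs_dvd N m).mpr hdvd) (by rw [hm]; exact pv_mod_abs_lt x N hN)
  · intro h
    rw [h]
    show Int.fmod (0 + 0) N = 0
    simp [Int.zero_fmod]

-- the A-loop returns true iff no element triggers either membership test
theorem pvLoopA_eq_not_any (S A : List Int) (m N : Int) :
    pvLoopA S A m N =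
      !(S.any (fun a => A.contains (PySem.Int.mod (a + m) N) ||
                        A.contains (PySem.Int.mod (m - a) N))) := by
  induction S with
  | nil => rfl
  | cons a rest ih =>
    simp only [pvLoopA, List.any_cons]
    by_cases h1 : A.contains (PySem.Int.mod (a + m) N) <;>
      by_cases h2 : A.contains (PySem.Int.mod (m - a) N) <;>
        simp [ih, Bool.and_assoc]

-- access along a (· ≤ ·)-sorted list is monotone
theorem pv_sorted_le (l : List Int) (h : l.Pairwise (· ≤ ·)) (p q : Nat)
    (hpq : p ≤ q) (hq : q < l.length) : l[p]'(by omega) ≤ l[q] := by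
  rcases eq_or_lt_of_le hpq with rfl | hlt
  · exact le_refl _
  · exact List.pairwise_iff_getElem.mp h p q (by omega) hq hlt

-- two-pointer correctness: pvPairSum finds a pair summing to t iff one exists in range
theorem pvPairSum_iff (S C : List Int) (t : Int)
    (hS : S.Pairwise (· ≤ ·)) (hC : C.Pairwise (· ≤ ·)) :
    ∀ n i j, (S.length - i) + j ≤ n → j < C.length →
    (pvPairSum S C t i j = true ↔
      ∃ (i' j' : Nat) (h1 : i' < S.length) (h2 : j' < C.length),
        i ≤ i' ∧ j' ≤ j ∧ S[i'] + C[j'] = t) := by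
  intro n
  induction n with
  | zero =>
    intro i j hm hj
    have hi : S.length ≤ i := by omega
    rw [pvPairSum]
    rw [List.getElem?_eq_none (by omega)]
    constructor
    · intro h; exact absurd h (by simp)
    · rintro ⟨i', j', h1, h2, hii, hjj, heq⟩; omega
  | succ n ih =>
    intro i j hm hj
    have hCj : C[j]? = some (C[j]'hj) := List.getElem?_eq_getElem hj
    by_cases hi : i < S.length
    · have hSi : S[i]? = some (S[i]'hi) := List.getElem?_eq_getElem hi
      rw [pvPairSum, hSi, hCj]
      simp only []
      by_cases heq : S[i]'hi + C[j]'hj = t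
      · rw [if_pos (by simpa using heq)]
        exact iff_of_true rfl ⟨i, j, hi, hj, le_rfl, le_rfl, heq⟩
      · rw [if_neg (by simpa using heq)]
        by_cases hgt : S[i]'hi + C[j]'hj > t
        · rw [if_pos hgt]
          by_cases hj0 : j = 0
          · rw [if_pos hj0]
            subst hj0
            constructor
            · intro h; exact absurd h (by simp)
            · rintro ⟨i', j', h1, h2, hii, hjj, hsum⟩
              have hj' : j' = 0 := by omega
              subst hj'
              have : S[i]'hi ≤ S[i'] := pv_sorted_le S hS i i' hii h1
              omega
          · rw [if_neg hj0]
            rw [ih i (j - 1) (by omega) (by omega)]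
            constructor
            · rintro ⟨i', j', h1, h2, hii, hjj, hsum⟩
              exact ⟨i', j', h1, h2, hii, by omega, hsum⟩
            · rintro ⟨i', j', h1, h2, hii, hjj, hsum⟩
              refine ⟨i', j', h1, h2, hii, ?_, hsum⟩
              by_contra hjj'
              have hj'' : j' = j := by omega
              subst hj''
              have : S[i]'hi ≤ S[i'] := pv_sorted_le S hS i i' hii h1
              omega
        · rw [if_neg hgt]
          rw [ih (i + 1) j (by omega) hj]
          constructor
          · rintro ⟨i', j', h1, h2, hii, hjj, hsum⟩
            exact ⟨i', j', h1, h2, by omega, hjj, hsum⟩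
          · rintro ⟨i', j', h1, h2, hii, hjj, hsum⟩
            refine ⟨i', j', h1, h2, ?_, hjj, hsum⟩
            by_contra hii'
            have hi'' : i' = i := by omega
            subst hi''
            have : C[j']'h2 ≤ C[j]'hj := pv_sorted_le C hC j' j hjj hj
            omega
    · rw [pvPairSum, List.getElem?_eq_none (by omega)]
      constructor
      · intro h; exact absurd h (by simp)
      · rintro ⟨i', j', h1, h2, hii, hjj, heq⟩; omega

-- top-level two-pointer spec
theorem pvPairSum_spec (S C : List Int) (t : Int)
    (hS : S.Pairwise (· ≤ ·)) (hC : C.Pairwise (· ≤ ·)) :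
    (pvPairSum S C t 0 (C.length - 1) = true ↔ ∃ s ∈ S, ∃ c ∈ C, s + c = t) := by
  cases hCc : C with
  | nil =>
    rw [pvPairSum]
    simp
  | cons c0 cs =>
    rw [← hCc]
    have hlen : 0 < C.length := by rw [hCc]; simp
    rw [pvPairSum_iff S C t hS hC ((S.length - 0) + (C.length - 1)) 0 (C.length - 1) le_rfl (by omega)]
    constructor
    · rintro ⟨i', j', h1, h2, -, -, heq⟩
      exact ⟨S[i'], List.getElem_mem h1, C[j'], List.getElem_mem h2, heq⟩
    · rintro ⟨s, hs, c, hc, heq⟩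
      obtain ⟨i', h1, rfl⟩ := List.mem_iff_getElem.mp hs
      obtain ⟨j', h2, rfl⟩ := List.mem_iff_getElem.mp hc
      exact ⟨i', j', h1, h2, Nat.zero_le _, by omega, heq⟩

-- canonical values: s + c ≡ r (mod N) resolves to two exact targets
theorem pv_sum_eq (s c r N : Int) (hN : N ≠ 0)
    (hs : PySem.Int.mod s N = s) (hc : PySem.Int.mod c N = c) (hr : PySem.Int.mod r N = r)
    (hcong : N ∣ (s + c - r)) : s + c = r ∨ s + c = r + N := by
  obtain ⟨k, hk⟩ := hcong
  have hk01 : k = 0 ∨ k = 1 := by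
    rcases lt_or_gt_of_ne hN with h' | h'
    · have b1 := PySem.Int.mod_neg_bounds s h'; rw [hs] at b1
      have b2 := PySem.Int.mod_neg_bounds c h'; rw [hc] at b2
      have b3 := PySem.Int.mod_neg_bounds r h'; rw [hr] at b3
      -- s + c - r ∈ (2N, -N)
      rcases lt_trichotomy k 0 with hk' | hk' | hk'
      · exfalso; nlinarith
      · left; omega
      · rcases eq_or_lt_of_le (by omega : (1:Int) ≤ k) with h1 | h1
        · right; omega
        · exfalso; nlinarith
    · have b1 := PySem.Int.mod_nonneg s h'; rw [hs] at b1
      have b1' := PySem.Int.mod_lt s h'; rw [hs] at b1'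
      have b2 := PySem.Int.mod_nonneg c h'; rw [hc] at b2
      have b2' := PySem.Int.mod_lt c h'; rw [hc] at b2'
      have b3 := PySem.Int.mod_nonneg r h'; rw [hr] at b3
      have b3' := PySem.Int.mod_lt r h'; rw [hr] at b3'
      -- s + c - r ∈ (-N, 2N)
      rcases lt_trichotomy k 0 with hk' | hk' | hk'
      · exfalso; nlinarith
      · left; omega
      · rcases eq_or_lt_of_le (by omega : (1:Int) ≤ k) with h1 | h1
        · right; omega
        · exfalso; nlinarith
  rcases hk01 with rfl | rfl
  · left; omega
  · right; omega

-- canonical values: c - s ≡ r (mod N) resolves to two exact targets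
theorem pv_diff_eq (s c r N : Int) (hN : N ≠ 0)
    (hs : PySem.Int.mod s N = s) (hc : PySem.Int.mod c N = c) (hr : PySem.Int.mod r N = r)
    (hcong : N ∣ (c - s - r)) : c - s = r ∨ c - s = r - N := by
  obtain ⟨k, hk⟩ := hcong
  have hk01 : k = 0 ∨ k = -1 := by
    rcases lt_or_gt_of_ne hN with h' | h'
    · have b1 := PySem.Int.mod_neg_bounds s h'; rw [hs] at b1
      have b2 := PySem.Int.mod_neg_bounds c h'; rw [hc] at b2
      have b3 := PySem.Int.mod_neg_bounds r h'; rw [hr] at b3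
      rcases lt_trichotomy k 0 with hk' | hk' | hk'
      · rcases eq_or_lt_of_le (by omega : k ≤ -1) with h1 | h1
        · right; omega
        · exfalso; nlinarith
      · left; omega
      · exfalso; nlinarith
    · have b1 := PySem.Int.mod_nonneg s h'; rw [hs] at b1
      have b1' := PySem.Int.mod_lt s h'; rw [hs] at b1'
      have b2 := PySem.Int.mod_nonneg c h'; rw [hc] at b2
      have b2' := PySem.Int.mod_lt c h'; rw [hc] at b2'
      have b3 := PySem.Int.mod_nonneg r h'; rw [hr] at b3
      have b3' := PySem.Int.mod_lt r h'; rw [hr] at b3'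
      rcases lt_trichotomy k 0 with hk' | hk' | hk'
      · rcases eq_or_lt_of_le (by omega : k ≤ -1) with h1 | h1
        · right; omega
        · exfalso; nlinarith
      · left; omega
      · exfalso; nlinarith
  rcases hk01 with rfl | rfl
  · left; omega
  · right; omega

-- a canonical value is in A iff it is in the canonical filter of A
theorem pv_mem_filter_canon (A : List Int) (v N : Int) (hv : PySem.Int.mod v N = v) :
    v ∈ A.filter (fun a => PySem.Int.mod a N == a) ↔ v ∈ A := by
  simp [List.mem_filter, hv]

-- condition (1): a + b = x
theorem pv_cond1_iff (A : List Int) (r N : Int) (hN : N ≠ 0) (hr : PySem.Int.mod r N = r) :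
    ((∃ a ∈ A, PySem.Int.mod (r - a) N ∈ A) ↔
      ∃ s ∈ A.map (fun a => PySem.Int.mod a N),
        ∃ c ∈ A.filter (fun a => PySem.Int.mod a N == a), s + c = r ∨ s + c = r + N) := by
  constructor
  · rintro ⟨a, ha, hv⟩
    have hvc : PySem.Int.mod (PySem.Int.mod (r - a) N) N = PySem.Int.mod (r - a) N :=
      pv_mod_idem _ N hN
    refine ⟨PySem.Int.mod a N, List.mem_map_of_mem ha, PySem.Int.mod (r - a) N,
      (pv_mem_filter_canon A _ N hvc).mpr hv, ?_⟩
    apply pv_sum_eq _ _ r N hN (pv_mod_idem a N hN) hvc hr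
    have h1 := PySem.Int.floordiv_mul_add_mod a N
    have h2 := PySem.Int.floordiv_mul_add_mod (r - a) N
    exact ⟨-(PySem.Int.floordiv a N) - PySem.Int.floordiv (r - a) N, by ring_nf; nlinarith [h1, h2]⟩
  · rintro ⟨s, hs, c, hcmem, hsum⟩
    obtain ⟨a, ha, rfl⟩ := List.mem_map.mp hs
    rw [List.mem_filter] at hcmem
    have hcc : PySem.Int.mod c N = c := by simpa using hcmem.2
    refine ⟨a, ha, ?_⟩
    have : PySem.Int.mod (r - a) N = c := by
      rw [← hcc]
      apply pv_mod_congr _ _ N hN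
      have h1 := PySem.Int.floordiv_mul_add_mod a N
      rcases hsum with h | h
      · exact ⟨-(PySem.Int.floordiv a N), by linear_combination h1 - h⟩
      · exact ⟨-(PySem.Int.floordiv a N) - 1, by linear_combination h1 - h⟩
    rw [this]; exact hcmem.1

-- condition (2): a + x = c
theorem pv_cond2_iff (A : List Int) (r N : Int) (hN : N ≠ 0) (hr : PySem.Int.mod r N = r) :
    ((∃ a ∈ A, PySem.Int.mod (a + r) N ∈ A) ↔
      ∃ c ∈ A.filter (fun a => PySem.Int.mod a N == a),
        ∃ a ∈ A, (c + -(PySem.Int.mod a N) = r ∨ c + -(PySem.Int.mod a N) = r - N)) := by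
  constructor
  · rintro ⟨a, ha, hv⟩
    have hvc : PySem.Int.mod (PySem.Int.mod (a + r) N) N = PySem.Int.mod (a + r) N :=
      pv_mod_idem _ N hN
    refine ⟨PySem.Int.mod (a + r) N, (pv_mem_filter_canon A _ N hvc).mpr hv, a, ha, ?_⟩
    have hres := pv_diff_eq (PySem.Int.mod a N) (PySem.Int.mod (a + r) N) r N hN
      (pv_mod_idem a N hN) hvc hr ?_
    · rcases hres with h | h
      · left; omega
      · right; omega
    · have h1 := PySem.Int.floordiv_mul_add_mod a N
      have h2 := PySem.Int.floordiv_mul_add_mod (a + r) N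
      exact ⟨PySem.Int.floordiv a N - PySem.Int.floordiv (a + r) N, by linear_combination h2 - h1⟩
  · rintro ⟨c, hcmem, a, ha, hsum⟩
    rw [List.mem_filter] at hcmem
    have hcc : PySem.Int.mod c N = c := by simpa using hcmem.2
    refine ⟨a, ha, ?_⟩
    have : PySem.Int.mod (a + r) N = c := by
      rw [← hcc]
      apply pv_mod_congr _ _ N hN
      have h1 := PySem.Int.floordiv_mul_add_mod a N
      rcases hsum with h | h
      · exact ⟨PySem.Int.floordiv a N, by linear_combination -h1 - h⟩
      · exact ⟨PySem.Int.floordiv a N + 1, by linear_combination -h1 - h⟩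
    rw [this]; exact hcmem.1

-- ===== VERDICT (by name: the statement is the Claim_ definition above) =====
theorem adding_keeps_sum_free_py_spec : Claim_equal_adding_keeps_sum_free_py := by
  intro A x N _ hN
  unfold Spec_adding_keeps_sum_free_py adding_keeps_sum_free_py adding_keeps_sum_free_py_alt
  simp only []
  set r := PySem.Int.mod x N with hrdef
  have hr : PySem.Int.mod r N = r := pv_mod_idem x N hN
  by_cases hr0 : r = 0
  · have h0 : PySem.Int.mod (0 : Int) N = (0 : Int) := by
      show Int.fmod _ N = 0
      simp [Int.zero_fmod]
    simp [hr0, h0]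
  · have hne : PySem.Int.mod (r + r) N ≠ r := fun h => hr0 ((pv_double_mod_eq_self_iff x N hN).mp h)
    set R := PySem.List.sorted (A.map (fun a => PySem.Int.mod a N)) (fun v => v) with hRdef
    set C := PySem.List.sorted (A.filter (fun a => PySem.Int.mod a N == a)) (fun v => v) with hCdef
    set negR := R.reverse.map (fun s => -s) with hnegdef
    have hRp : R.Pairwise (· ≤ ·) := by
      have := PySem.List.sorted_pairwise (xs := A.map (fun a => PySem.Int.mod a N)) (key := fun v => v)
      simpa [hRdef] using this
    have hCp : C.Pairwise (· ≤ ·) := by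
      have := PySem.List.sorted_pairwise (xs := A.filter (fun a => PySem.Int.mod a N == a)) (key := fun v => v)
      simpa [hCdef] using this
    have hnegp : negR.Pairwise (· ≤ ·) := by
      rw [hnegdef, List.pairwise_map, List.pairwise_reverse]
      exact hRp.imp (fun h => by omega)
    have hmemC : ∀ c, c ∈ C ↔ (c ∈ A ∧ PySem.Int.mod c N = c) := by
      intro c
      rw [hCdef, PySem.List.mem_sorted, List.mem_filter]
      simp
    have hmemR : ∀ s, s ∈ R ↔ ∃ a ∈ A, PySem.Int.mod a N = s := by
      intro s
      rw [hRdef, PySem.List.mem_sorted, List.mem_map]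
    have hmemNeg : ∀ u, u ∈ negR ↔ ∃ a ∈ A, -(PySem.Int.mod a N) = u := by
      intro u
      rw [hnegdef, List.mem_map]
      constructor
      · rintro ⟨s, hs, rfl⟩
        rw [List.mem_reverse] at hs
        obtain ⟨a, ha, rfl⟩ := (hmemR s).mp hs
        exact ⟨a, ha, rfl⟩
      · rintro ⟨a, ha, rfl⟩
        exact ⟨PySem.Int.mod a N, List.mem_reverse.mpr ((hmemR _).mpr ⟨a, ha, rfl⟩), rfl⟩
    by_cases hc : PySem.Int.mod (r + r) N ∈ A
    · have hcC : PySem.Int.mod (r + r) N ∈ C := by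
        rw [hmemC]
        exact ⟨hc, pv_mod_idem _ N hN⟩
      simp [hc, hne, hr0, hcC]
    · have hcC : C.contains (PySem.Int.mod (r + r) N) = false := by
        rw [Bool.eq_false_iff]
        intro h
        rw [List.contains_iff_mem, hmemC] at h
        exact hc h.1
      -- the interesting case: loop vs two-pointer sweeps
      have hX : (A.any fun a => A.contains (PySem.Int.mod (a + r) N) ||
                                A.contains (PySem.Int.mod (r - a) N)) =
          (([r, r + N].any fun t => pvPairSum R C t 0 (C.length - 1)) ||
           ([r, r - N].any fun t => pvPairSum C negR t 0 (negR.length - 1))) := by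
        rw [Bool.eq_iff_iff]
        simp only [List.any_eq_true, List.mem_cons, List.not_mem_nil, or_false,
          Bool.or_eq_true, List.contains_iff_mem]
        constructor
        · rintro ⟨a, ha, hv | hv⟩
          · -- a + x = c : right block
            right
            obtain ⟨c, hcm, a', ha', hor⟩ := (pv_cond2_iff A r N hN hr).mp ⟨a, ha, hv⟩
            have hcm' : c ∈ C := by rw [hmemC]; rw [List.mem_filter] at hcm; simpa using hcm
            have hu : -(PySem.Int.mod a' N) ∈ negR := (hmemNeg _).mpr ⟨a', ha', rfl⟩
            rcases hor with h | h
            · exact ⟨r, Or.inl rfl, (pvPairSum_spec C negR r hCp hnegp).mpr ⟨c, hcm', _, hu, h⟩⟩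
            · exact ⟨r - N, Or.inr rfl, (pvPairSum_spec C negR (r - N) hCp hnegp).mpr ⟨c, hcm', _, hu, h⟩⟩
          · -- a + b = x : left block
            left
            obtain ⟨s, hsm, c, hcm, hor⟩ := (pv_cond1_iff A r N hN hr).mp ⟨a, ha, hv⟩
            have hsm' : s ∈ R := by rw [hmemR]; exact List.mem_map.mp hsm
            have hcm' : c ∈ C := by rw [hmemC]; rw [List.mem_filter] at hcm; simpa using hcm
            rcases hor with h | h
            · exact ⟨r, Or.inl rfl, (pvPairSum_spec R C r hRp hCp).mpr ⟨s, hsm', c, hcm', h⟩⟩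
            · exact ⟨r + N, Or.inr rfl, (pvPairSum_spec R C (r + N) hRp hCp).mpr ⟨s, hsm', c, hcm', h⟩⟩
        · rintro (⟨t, ht, hps⟩ | ⟨t, ht, hps⟩)
          · -- left block: a + b = x
            obtain ⟨s, hsm, c, hcm, hsum⟩ := (pvPairSum_spec R C t hRp hCp).mp hps
            have hsm' : s ∈ A.map (fun a => PySem.Int.mod a N) := by
              rw [List.mem_map]
              exact (hmemR s).mp hsm
            have hcm' : c ∈ A.filter (fun a => PySem.Int.mod a N == a) := by
              rw [List.mem_filter]
              have := (hmemC c).mp hcm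
              simp [this.1, this.2]
            have hor : s + c = r ∨ s + c = r + N := by
              rcases ht with rfl | rfl
              · left; exact hsum
              · right; exact hsum
            obtain ⟨a, ha, hv⟩ := (pv_cond1_iff A r N hN hr).mpr ⟨s, hsm', c, hcm', hor⟩
            exact ⟨a, ha, Or.inr hv⟩
          · -- right block: a + x = c
            obtain ⟨c, hcm, u, hum, hsum⟩ := (pvPairSum_spec C negR t hCp hnegp).mp hps
            obtain ⟨a', ha', rfl⟩ := (hmemNeg u).mp hum
            have hcm' : c ∈ A.filter (fun a => PySem.Int.mod a N == a) := by
              rw [List.mem_filter]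
              have := (hmemC c).mp hcm
              simp [this.1, this.2]
            have hor : c + -(PySem.Int.mod a' N) = r ∨ c + -(PySem.Int.mod a' N) = r - N := by
              rcases ht with rfl | rfl
              · left; exact hsum
              · right; exact hsum
            obtain ⟨a, ha, hv⟩ := (pv_cond2_iff A r N hN hr).mpr ⟨c, hcm', a', ha', hor⟩
            exact ⟨a, ha, Or.inl hv⟩
      have hcA : A.contains (PySem.Int.mod (r + r) N) = false := by
        rw [Bool.eq_false_iff]
        intro h
        exact hc (List.contains_iff_mem.mp h)
      simp only [hcA, hne, hr0, beq_iff_eq, Bool.false_or, if_false, pvLoopA_eq_not_any, hcC]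
      rw [hX, Bool.not_or]
      simp
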